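-- pv_equiv track=rewrite | github.com/jantuomi/ATK16 | src/assembler.py | parse
-- ===== SOURCE A (Python) =====
-- def parse(line: str) -> list[str]:
--   depth = 0
--   result = []
--   acc = ""
--   for c in line:
--     if c.isspace() and depth == 0:
--       result.append(acc)
--       acc = ""
--     elif c == "(":
--       depth += 1
--       acc += "("
--     elif c == ")":
--       depth -= 1
--       acc += ")"
--     else:
--       acc += c
--
--   result.append(acc)
--   return list(filter(lambda x: len(x) > 0, result))
-- ===== SOURCE B (Python) =====
-- def parse(line: str) -> list[str]:
--   # pass 1: record indices of depth-0 whitespace (token boundaries)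
--   depth = 0
--   bounds = []
--   for i, c in enumerate(line):
--     if c == "(":
--       depth += 1
--     elif c == ")":
--       depth -= 1
--     elif c.isspace() and depth == 0:
--       bounds.append(i)
--   # pass 2: slice the line at the boundaries
--   pieces = []
--   start = 0
--   for b in bounds:
--     pieces.append(line[start:b])
--     start = b + 1
--   pieces.append(line[start:])
--   return [p for p in pieces if p]
-- ===== Notes on version B (the rewrite author's own statement) =====
-- stated objective: alternative
-- what changed: Replaces A's single pass with a growing string accumulator by two passes: first collect the indices of depth-0 whitespace characters, then cut the tokens out of the original line by slicing at those boundary indices.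
import Mathlib
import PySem

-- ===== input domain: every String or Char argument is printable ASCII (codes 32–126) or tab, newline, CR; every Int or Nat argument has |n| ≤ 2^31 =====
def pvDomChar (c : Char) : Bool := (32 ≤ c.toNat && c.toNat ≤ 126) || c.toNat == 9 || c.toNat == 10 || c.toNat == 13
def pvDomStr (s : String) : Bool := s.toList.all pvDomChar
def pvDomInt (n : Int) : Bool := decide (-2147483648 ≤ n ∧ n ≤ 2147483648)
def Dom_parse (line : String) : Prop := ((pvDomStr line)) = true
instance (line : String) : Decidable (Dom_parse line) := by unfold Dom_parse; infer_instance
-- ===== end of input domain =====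

-- B replaces A's single accumulator loop by two passes: collect the indices of
-- depth-0 whitespace, then slice the line at those boundaries (objective: alternative).

-- ===== PORT A =====
-- A's loop body: state (depth, result, acc); acc/pieces are List Char (Python str)
def parseStepA (s : Int × List (List Char) × List Char) (c : Char) :
    Int × List (List Char) × List Char :=
  if PySem.Chars.isspace c ∧ s.1 = 0 then (s.1, s.2.1 ++ [s.2.2], [])
  else if c = '(' then (s.1 + 1, s.2.1, s.2.2 ++ ['('])
  else if c = ')' then (s.1 - 1, s.2.1, s.2.2 ++ [')'])
  else (s.1, s.2.1, s.2.2 ++ [c])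

def parse (line : String) : List String :=
  let st := line.toList.foldl parseStepA ((0 : Int), ([] : List (List Char)), ([] : List Char))
  ((st.2.1 ++ [st.2.2]).filter (fun x => !x.isEmpty)).map String.ofList

-- ===== PORT B =====
-- pass 1 body: state (depth, bounds), input (index, char) from enumerate
def parseStepB1 (s : Int × List Int) (ic : Int × Char) : Int × List Int :=
  if ic.2 = '(' then (s.1 + 1, s.2)
  else if ic.2 = ')' then (s.1 - 1, s.2)
  else if PySem.Chars.isspace ic.2 ∧ s.1 = 0 then (s.1, s.2 ++ [ic.1])
  else s

-- pass 2 body: state (start, pieces); slices the original char list at a boundary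
def parseStepB2 (cs : List Char) (s : Int × List (List Char)) (b : Int) :
    Int × List (List Char) :=
  (b + 1, s.2 ++ [PySem.List.slice cs (some s.1) (some b)])

def parse_alt (line : String) : List String :=
  let cs := line.toList
  let st1 := (PySem.List.enumerate cs).foldl parseStepB1 ((0 : Int), ([] : List Int))
  let st2 := st1.2.foldl (parseStepB2 cs) ((0 : Int), ([] : List (List Char)))
  let pieces := st2.2 ++ [PySem.List.slice cs (some st2.1) none]
  (pieces.filter (fun p => !p.isEmpty)).map String.ofList

-- ===== PRECONDITION & SPEC =====
def Spec_parse (line : String) (out : List String) : Prop := out = parse_alt line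
instance (line : String) (out : List String) : Decidable (Spec_parse line out) := by unfold Spec_parse; infer_instance

-- ===== CLAIM (what is proved, stated in full; the proofs are below) =====
def Claim_equal_parse : Prop := ∀ (line : String), Dom_parse line → Spec_parse line (parse line)

-- ===== LEMMAS AND PROOFS =====

-- the unfiltered token pieces of cs at depth d: (first piece, remaining pieces)
def gTok : List Char → Int → List Char × List (List Char)
  | [], _ => ([], [])
  | c :: cs, d =>
    if PySem.Chars.isspace c ∧ d = 0 then
      ([], (gTok cs d).1 :: (gTok cs d).2)
    else if c = '(' then
      (c :: (gTok cs (d + 1)).1, (gTok cs (d + 1)).2)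
    else if c = ')' then
      (c :: (gTok cs (d - 1)).1, (gTok cs (d - 1)).2)
    else
      (c :: (gTok cs d).1, (gTok cs d).2)

-- boundary indices of cs when scanning starts at absolute index n and depth d
def gBounds : List Char → Nat → Int → List Int
  | [], _, _ => []
  | c :: cs, n, d =>
    if c = '(' then gBounds cs (n + 1) (d + 1)
    else if c = ')' then gBounds cs (n + 1) (d - 1)
    else if PySem.Chars.isspace c ∧ d = 0 then (n : Int) :: gBounds cs (n + 1) d
    else gBounds cs (n + 1) d

-- the pieces that pass 2 cuts out of `full` for a given boundary list and start
def gPieces (full : List Char) : List Int → Int → List (List Char)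
  | [], start => [PySem.List.slice full (some start) none]
  | b :: bs, start => PySem.List.slice full (some start) (some b) :: gPieces full bs (b + 1)

theorem foldA_pieces (cs : List Char) :
    ∀ (d : Int) (res : List (List Char)) (acc : List Char),
      (cs.foldl parseStepA (d, res, acc)).2.1 ++ [(cs.foldl parseStepA (d, res, acc)).2.2]
        = res ++ (acc ++ (gTok cs d).1) :: (gTok cs d).2 := by
  induction cs with
  | nil => intro d res acc; simp [gTok]
  | cons c cs ih =>
    intro d res acc
    by_cases hs : PySem.Chars.isspace c ∧ d = 0
    · simp [parseStepA, gTok, hs, ih]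
    · by_cases hl : c = '('
      · simp [parseStepA, gTok, hl, (by decide : PySem.Chars.isspace '(' = false), ih]
      · by_cases hr : c = ')'
        · simp [parseStepA, gTok, hr, (by decide : PySem.Chars.isspace ')' = false), ih]
        · simp [parseStepA, gTok, hs, hl, hr, ih]

theorem foldB1_bounds (cs : List Char) :
    ∀ (n : Nat) (d : Int) (bs : List Int),
      ((PySem.List.enumerate cs (n : Int)).foldl parseStepB1 (d, bs)).2
        = bs ++ gBounds cs n d := by
  induction cs with
  | nil => intro n d bs; simp [PySem.List.enumerate, gBounds]
  | cons c cs ih =>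
    intro n d bs
    have hen : PySem.List.enumerate (c :: cs) (n : Int)
        = ((n : Int), c) :: PySem.List.enumerate cs ((n + 1 : Nat) : Int) := by
      push_cast
      simp [PySem.List.enumerate]
    rw [hen]
    have ih' := fun d bs => ih (n + 1) d bs
    push_cast at ih'
    by_cases hl : c = '('
    · simp [parseStepB1, gBounds, hl, ih']
    · by_cases hr : c = ')'
      · simp [parseStepB1, gBounds, hr, ih']
      · by_cases hs : PySem.Chars.isspace c ∧ d = 0
        · simp [parseStepB1, gBounds, hl, hr, hs, ih']
        · simp [parseStepB1, gBounds, hl, hr, hs, ih']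

theorem foldB2_pieces (cs : List Char) (bs : List Int) :
    ∀ (start : Int) (ps : List (List Char)),
      (bs.foldl (parseStepB2 cs) (start, ps)).2
          ++ [PySem.List.slice cs (some (bs.foldl (parseStepB2 cs) (start, ps)).1) none]
        = ps ++ gPieces cs bs start := by
  induction bs with
  | nil => intro start ps; simp [gPieces]
  | cons b bs ih => intro start ps; simp [parseStepB2, gPieces, ih]

theorem slice_succ (full : List Char) {n : Nat} {start : Nat} (hsn : start ≤ n)
    (hn : n < full.length) :
    PySem.List.slice full (some (n + 1 : Nat)) (some (n + 1 : Nat)) = [] ∧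
    PySem.List.slice full (some (start : Nat)) (some (n + 1 : Nat))
      = PySem.List.slice full (some (start : Nat)) (some (n : Nat)) ++ [full[n]] := by
  constructor
  · rw [PySem.List.slice_natCast]; simp
  · rw [PySem.List.slice_natCast, PySem.List.slice_natCast]
    have h1 : n + 1 - start = (n - start) + 1 := by omega
    rw [h1, List.take_add_one]
    congr 1
    have h2 : (full.drop start)[n - start]? = full[n]? := by
      rw [List.getElem?_drop]; congr 1; omega
    rw [h2, List.getElem?_eq_getElem hn]
    rfl

theorem gPieces_gBounds (full : List Char) :
    ∀ (cs : List Char) (n start : Nat) (d : Int), start ≤ n → full.drop n = cs →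
      gPieces full (gBounds cs n d) (start : Nat)
        = (PySem.List.slice full (some (start : Nat)) (some (n : Nat)) ++ (gTok cs d).1)
            :: (gTok cs d).2 := by
  intro cs
  induction cs with
  | nil =>
    intro n start d hsn hdrop
    have hlen : full.length ≤ n := List.drop_eq_nil_iff.mp hdrop
    simp only [gBounds, gPieces, gTok]
    rw [PySem.List.slice_natCast,
      PySem.List.slice_from full (a := (start : Int)) (by exact_mod_cast Nat.zero_le start)]
    simp only [Int.toNat_natCast, List.append_nil]
    rw [List.take_of_length_le (by simp; omega)]
  | cons c cs ih =>
    intro n start d hsn hdrop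
    have hn : n < full.length := by
      by_contra h
      rw [List.drop_eq_nil_of_le (by omega)] at hdrop
      exact List.cons_ne_nil _ _ hdrop.symm
    have hc? : full[n]? = some c := by
      have h0 : (full.drop n)[0]? = some c := by rw [hdrop]; rfl
      rwa [List.getElem?_drop, Nat.add_zero] at h0
    have hc : full[n] = c := by
      have := List.getElem?_eq_getElem hn
      rw [hc?] at this
      exact (Option.some.inj this).symm
    have hdrop' : full.drop (n + 1) = cs := by
      have : (full.drop n).tail = cs := by rw [hdrop]; rfl
      rwa [List.tail_drop] at this
    obtain ⟨hsl0, hsl1⟩ := slice_succ full hsn hn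
    by_cases hl : c = '('
    · rw [gBounds, if_pos hl, ih (n + 1) start (d + 1) (by omega) hdrop', hsl1, hc, hl]
      simp [gTok, (by decide : PySem.Chars.isspace '(' = false)]
    · by_cases hr : c = ')'
      · rw [gBounds, if_neg hl, if_pos hr, ih (n + 1) start (d - 1) (by omega) hdrop',
          hsl1, hc, hr]
        simp [gTok, (by decide : PySem.Chars.isspace ')' = false),
          (by decide : ((')' : Char) = '(') = False)]
      · by_cases hs : PySem.Chars.isspace c ∧ d = 0
        · rw [gBounds, if_neg hl, if_neg hr, if_pos hs, gPieces,
            (by push_cast; ring : ((n : Int) + 1) = ((n + 1 : Nat) : Int)),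
            ih (n + 1) (n + 1) d (le_refl _) hdrop', hsl0]
          simp [gTok, hs]
        · rw [gBounds, if_neg hl, if_neg hr, if_neg hs,
            ih (n + 1) start d (by omega) hdrop', hsl1, hc]
          simp [gTok, hs, hl, hr]

-- ===== VERDICT (by name: the statement is the Claim_ definition above) =====
theorem parse_spec : Claim_equal_parse := by
  intro line _
  unfold Spec_parse
  have hA := foldA_pieces line.toList 0 [] []
  have hB1 := foldB1_bounds line.toList 0 0 []
  have hB2 := foldB2_pieces line.toList
    ((PySem.List.enumerate line.toList).foldl parseStepB1 (0, [])).2 0 []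
  have hMain := gPieces_gBounds line.toList line.toList 0 0 0 (le_refl 0) (by simp)
  have h0 : PySem.List.slice line.toList (some ((0 : Nat) : Int)) (some ((0 : Nat) : Int)) = [] := by
    rw [PySem.List.slice_natCast]; simp
  simp only [Nat.cast_zero] at hB1 hMain h0
  rw [hB1] at hB2
  rw [h0] at hMain
  simp only [List.nil_append] at hA hB1 hB2 hMain
  unfold parse parse_alt
  simp only [hA, hB1]
  rw [hB2, hMain]
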